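-- pv_equiv track=rewrite | github.com/benchaddha/modular-addition-grokking | src/surgery.py | _enumerate_head_subsets
-- ===== SOURCE A (Python) =====
-- from typing import Any, Dict, List, Optional, Sequence, Tuple
--
-- def _enumerate_head_subsets(
--     all_heads: Sequence[Tuple[int, int]],
--     max_heads: int = 10,
-- ) -> List[List[Tuple[int, int]]]:
--     total_heads = len(all_heads)
--     if total_heads > max_heads:
--         raise ValueError(
--             f"Exhaustive subset ablation is disabled for total_heads={total_heads}; "
--             f"max supported is {max_heads}."
--         )
--
--     subsets: List[List[Tuple[int, int]]] = []
--     for mask in range(1 << total_heads):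
--         subset = [
--             all_heads[index]
--             for index in range(total_heads)
--             if (mask >> index) & 1
--         ]
--         subsets.append(subset)
--     return subsets
-- ===== SOURCE B (Python) =====
-- from typing import List, Sequence, Tuple
--
-- def _enumerate_head_subsets(
--     all_heads: Sequence[Tuple[int, int]],
--     max_heads: int = 10,
-- ) -> List[List[Tuple[int, int]]]:
--     total_heads = len(all_heads)
--     if total_heads > max_heads:
--         raise ValueError(
--             f"Exhaustive subset ablation is disabled for total_heads={total_heads}; "
--             f"max supported is {max_heads}."
--         )
--     subsets: List[List[Tuple[int, int]]] = [[]]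
--     for head in all_heads:
--         subsets = subsets + [s + [head] for s in subsets]
--     return subsets
-- ===== Notes on version B (the rewrite author's own statement) =====
-- stated objective: alternative
-- what changed: Replaces the bitmask decoding (for each of 2^n masks, scan all n bit positions and index into the list) by iterative powerset doubling that appends each new head to copies of the existing subsets, producing the identical order.
import Mathlib
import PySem

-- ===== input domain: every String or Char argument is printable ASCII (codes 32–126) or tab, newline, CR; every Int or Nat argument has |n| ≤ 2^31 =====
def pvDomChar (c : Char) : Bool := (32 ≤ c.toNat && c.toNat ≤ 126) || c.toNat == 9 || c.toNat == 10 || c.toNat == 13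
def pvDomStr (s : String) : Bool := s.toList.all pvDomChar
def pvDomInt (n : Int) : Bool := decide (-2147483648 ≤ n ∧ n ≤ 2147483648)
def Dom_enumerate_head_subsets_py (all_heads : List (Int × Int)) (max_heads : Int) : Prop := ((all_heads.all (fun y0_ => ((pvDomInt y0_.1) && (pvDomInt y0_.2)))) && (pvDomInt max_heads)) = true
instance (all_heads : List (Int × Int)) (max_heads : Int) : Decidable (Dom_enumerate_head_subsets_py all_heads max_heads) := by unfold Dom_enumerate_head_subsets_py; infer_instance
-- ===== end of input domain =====

-- B replaces the bitmask enumeration by iterative powerset doubling (same subset order); objective: alternative decomposition.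
-- Inputs with total_heads > max_heads raise ValueError in both programs and are excluded by Pre_.

-- ===== PORT A =====
-- A: for mask in range(2^n): subset = [all_heads[i] for i in range(n) if (mask >> i) & 1]; subsets.append(subset)
-- (mask >> index) & 1 == 1  is exactly Nat.testBit mask index; all indices are in range, so getD is exact.
def enumerate_head_subsets_py (all_heads : List (Int × Int)) (max_heads : Int) : List (List (Int × Int)) :=
  let total_heads := all_heads.length
  if (total_heads : Int) > max_heads then
    []  -- Python raises ValueError here; excluded by Pre_
  else
    (List.range (2 ^ total_heads)).foldl
      (fun subsets mask =>
        subsets ++ [((List.range total_heads).filter (fun index => Nat.testBit mask index)).map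
          (fun index => all_heads.getD index (0, 0))])
      []

-- ===== PORT B =====
-- B: subsets = [[]]; for head in all_heads: subsets = subsets + [s + [head] for s in subsets]
def enumerate_head_subsets_py_alt (all_heads : List (Int × Int)) (max_heads : Int) : List (List (Int × Int)) :=
  if (all_heads.length : Int) > max_heads then
    []  -- Python raises ValueError here; excluded by Pre_
  else
    all_heads.foldl (fun subsets head => subsets ++ subsets.map (fun s => s ++ [head])) [[]]

-- ===== PRECONDITION & SPEC =====
-- Pre_ excludes exactly the inputs where A raises ValueError (total_heads > max_heads).
def Pre_enumerate_head_subsets_py (all_heads : List (Int × Int)) (max_heads : Int) : Prop :=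
  (all_heads.length : Int) ≤ max_heads
instance (all_heads : List (Int × Int)) (max_heads : Int) : Decidable (Pre_enumerate_head_subsets_py all_heads max_heads) := by unfold Pre_enumerate_head_subsets_py; infer_instance
def pvWitness_enumerate_head_subsets_py : (List (Int × Int)) × Int := ([(0, 1), (0, 2)], 10)

def Spec_enumerate_head_subsets_py (all_heads : List (Int × Int)) (max_heads : Int) (out : List (List (Int × Int))) : Prop := out = enumerate_head_subsets_py_alt all_heads max_heads
instance (all_heads : List (Int × Int)) (max_heads : Int) (out : List (List (Int × Int))) : Decidable (Spec_enumerate_head_subsets_py all_heads max_heads out) := by unfold Spec_enumerate_head_subsets_py; infer_instance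

-- ===== CLAIM (what is proved, stated in full; the proofs are below) =====
def Claim_equal_enumerate_head_subsets_py : Prop := ∀ (all_heads : List (Int × Int)) (max_heads : Int), Dom_enumerate_head_subsets_py all_heads max_heads → Pre_enumerate_head_subsets_py all_heads max_heads → Spec_enumerate_head_subsets_py all_heads max_heads (enumerate_head_subsets_py all_heads max_heads)

-- ===== LEMMAS AND PROOFS =====

-- append-accumulator foldl is map
theorem pv_foldl_append_map {α β : Type} (f : α → β) (l : List α) (acc : List β) :
    l.foldl (fun a m => a ++ [f m]) acc = acc ++ l.map f := by
  induction l generalizing acc with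
  | nil => simp
  | cons x xs ih => simp [List.foldl, ih, List.append_assoc]

-- the bitmask enumeration, as a map
def pvBitmask (xs : List (Int × Int)) : List (List (Int × Int)) :=
  (List.range (2 ^ xs.length)).map
    (fun mask => ((List.range xs.length).filter (fun i => Nat.testBit mask i)).map
      (fun i => xs.getD i (0, 0)))

theorem pv_testBit_high {n mask : ℕ} (h : mask < 2 ^ n) : Nat.testBit mask n = false :=
  Nat.testBit_lt_two_pow h

theorem pv_testBit_add_pow {n mask i : ℕ} (hi : i < n) :
    Nat.testBit (2 ^ n + mask) i = Nat.testBit mask i := by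
  rw [Nat.testBit_eq_decide_div_mod_eq, Nat.testBit_eq_decide_div_mod_eq]
  have h1 : 2 ^ n + mask = mask + 2 ^ (n - i - 1) * 2 * 2 ^ i := by
    rw [mul_assoc, ← pow_succ', ← pow_add]
    have : n - i - 1 + (i + 1) = n := by omega
    rw [this]; omega
  rw [h1, Nat.add_mul_div_right _ _ (Nat.pos_of_ne_zero (by positivity)),
    Nat.add_mul_mod_self_right]

theorem pv_testBit_add_pow_self {n mask : ℕ} (hm : mask < 2 ^ n) :
    Nat.testBit (2 ^ n + mask) n = true := by
  rw [Nat.testBit_eq_decide_div_mod_eq]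
  rw [add_comm, Nat.add_div_right _ (Nat.pos_of_ne_zero (by positivity)),
    Nat.div_eq_of_lt hm]
  decide

-- core equivalence: bitmask order = doubling order
theorem pv_bitmask_eq_doubling (xs : List (Int × Int)) :
    pvBitmask xs = xs.foldl (fun subsets head => subsets ++ subsets.map (fun s => s ++ [head])) [[]] := by
  induction xs using List.reverseRecOn with
  | nil => decide
  | append_singleton xs h ih =>
    rw [List.foldl_append, ← ih]
    simp only [List.foldl_cons, List.foldl_nil]
    unfold pvBitmask
    have hlen : (xs ++ [h]).length = xs.length + 1 := by simp
    rw [hlen]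
    simp only [List.range_succ, List.filter_append, List.filter_cons, List.filter_nil,
      List.map_append]
    rw [show (2 : ℕ) ^ (xs.length + 1) = 2 ^ xs.length + 2 ^ xs.length by ring,
      List.range_add, List.map_append, List.map_map]
    congr 1
    · -- low masks: bit (xs.length) is unset, behaves like the powerset of xs
      apply List.map_congr_left
      intro mask hmask
      have hlt : mask < 2 ^ xs.length := List.mem_range.mp hmask
      simp only [pv_testBit_high hlt, Bool.false_eq_true, if_false, List.map_nil,
        List.append_nil]
      apply List.map_congr_left
      intro i hi
      have : i < xs.length := List.mem_range.mp (List.mem_of_mem_filter hi)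
      rw [List.getD_append _ _ _ _ this]
    · -- high masks: bit (xs.length) is set, subsets gain h at the end
      rw [List.map_map]
      apply List.map_congr_left
      intro mask hmask
      have hlt : mask < 2 ^ xs.length := List.mem_range.mp hmask
      simp only [Function.comp, pv_testBit_add_pow_self hlt, if_true, List.map_cons,
        List.map_nil]
      congr 1
      · have hfil : (List.range xs.length).filter (fun i => Nat.testBit (2 ^ xs.length + mask) i)
            = (List.range xs.length).filter (fun i => Nat.testBit mask i) := by
          apply List.filter_congr
          intro i hi
          rw [pv_testBit_add_pow (List.mem_range.mp hi)]
        rw [hfil]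
        apply List.map_congr_left
        intro i hi
        have : i < xs.length := List.mem_range.mp (List.mem_of_mem_filter hi)
        rw [List.getD_append _ _ _ _ this]
      · simp [List.getD]

-- ===== VERDICT (by name: the statement is the Claim_ definition above) =====
theorem enumerate_head_subsets_py_spec : Claim_equal_enumerate_head_subsets_py := by
  intro all_heads max_heads _ hpre
  unfold Spec_enumerate_head_subsets_py enumerate_head_subsets_py enumerate_head_subsets_py_alt
  have hle : ¬ ((all_heads.length : Int) > max_heads) := not_lt.mpr hpre
  simp only [hle, if_false]
  rw [pv_foldl_append_map, List.nil_append, ← pvBitmask, pv_bitmask_eq_doubling]
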